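-- pv_equiv track=rewrite | github.com/aan2907/Mental-Health-Assessment-using-Facial-Emotions-and-DASS21 | Mental Health Assessment/mental_health_assessment.py | assessment
-- ===== SOURCE A (Python) =====
-- def final_assessment(score):
--   if score<=20:
--     return "Normal", "Focus on self care"
--   elif score<=32:
--     return "Mild", "Advise to consult a psychologist"
--   elif score<=41:
--     return "Moderate", "Best to consult a psychologist"
--   elif score<=47:
--     return "Severe", "Advise to consult a psychiatrist"
--   else:
--     return "Extreme", "Must see a psychiatrist"
--
-- def assessment(emotions, scores, negatives):
--
--     stress= [1, 6, 8, 11, 12, 14, 18]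
--     anxiety= [2, 4, 7, 9, 15, 19, 20]
--     depression= [3, 5, 10, 13, 16, 17, 21]
--     stress_score, anxiety_score, depression_score= 0, 0, 0
--     dass_val= []
--     for i in range(len(scores)):
--         if (i+1) in stress:
--             stress_score+= scores[i]
--         elif (i+1) in anxiety:
--             anxiety_score+= scores[i]
--         elif (i+1) in depression:
--             depression_score+= scores[i]
--
--     dass_val.append(stress_score)
--     dass_val.append(anxiety_score)
--     dass_val.append(depression_score)
--
--     total_score= stress_score+anxiety_score+depression_score
--
--     for emo in emotions:
--         if emo in negatives:
--           total_score+= 1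
--         else:
--            total_score-= 1
--
--     symptom, final_assess= final_assessment(total_score)
--
--
--     return symptom, final_assess, dass_val, total_score
-- ===== SOURCE B (Python) =====
-- STRESS = (1, 6, 8, 11, 12, 14, 18)
-- ANXIETY = (2, 4, 7, 9, 15, 19, 20)
-- DEPRESSION = (3, 5, 10, 13, 16, 17, 21)
--
--
-- def _severity(score):
--     if score <= 20:
--         return "Normal", "Focus on self care"
--     elif score <= 32:
--         return "Mild", "Advise to consult a psychologist"
--     elif score <= 41:
--         return "Moderate", "Best to consult a psychologist"
--     elif score <= 47:
--         return "Severe", "Advise to consult a psychiatrist"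
--     else:
--         return "Extreme", "Must see a psychiatrist"
--
--
-- def assessment(emotions, scores, negatives):
--     n = len(scores)
--
--     def subscore(idx):
--         return sum(scores[i - 1] for i in idx if i - 1 < n)
--
--     dass_val = [subscore(STRESS), subscore(ANXIETY), subscore(DEPRESSION)]
--     negative_hits = sum(1 for e in emotions if e in negatives)
--     total_score = sum(dass_val) + 2 * negative_hits - len(emotions)
--     symptom, advice = _severity(total_score)
--     return symptom, advice, dass_val, total_score
-- ===== Notes on version B (the rewrite author's own statement) =====
-- stated objective: simpler
-- what changed: B drops A's index loop over scores with the three-way elif membership tests: each DASS subscore is a direct guarded sum over its fixed index set, and the per-emotion +1/-1 loop becomes total = dass + 2*negative_hits - len(emotions).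
import Mathlib
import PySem

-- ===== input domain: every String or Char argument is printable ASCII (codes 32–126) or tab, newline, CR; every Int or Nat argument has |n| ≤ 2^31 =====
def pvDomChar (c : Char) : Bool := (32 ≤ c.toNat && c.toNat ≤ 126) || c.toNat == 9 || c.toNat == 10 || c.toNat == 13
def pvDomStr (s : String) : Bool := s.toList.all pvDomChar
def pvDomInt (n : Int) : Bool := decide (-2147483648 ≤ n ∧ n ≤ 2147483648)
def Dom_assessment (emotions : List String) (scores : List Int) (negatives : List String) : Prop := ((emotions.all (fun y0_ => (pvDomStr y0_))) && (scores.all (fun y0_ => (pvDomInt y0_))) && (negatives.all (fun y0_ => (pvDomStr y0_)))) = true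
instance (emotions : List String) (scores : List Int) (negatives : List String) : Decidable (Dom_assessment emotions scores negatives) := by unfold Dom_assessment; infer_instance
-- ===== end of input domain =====

-- B replaces A's branching loop over the scores by direct guarded sums over the three fixed
-- DASS index sets and a count of negative emotions (total = dass + 2*hits - len); objective: simpler.

-- ===== PORT A =====
def finalAssessmentA (score : Int) : String × String :=
  if score ≤ 20 then ("Normal", "Focus on self care")
  else if score ≤ 32 then ("Mild", "Advise to consult a psychologist")
  else if score ≤ 41 then ("Moderate", "Best to consult a psychologist")
  else if score ≤ 47 then ("Severe", "Advise to consult a psychiatrist")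
  else ("Extreme", "Must see a psychiatrist")

-- A's for-loop over range(len(scores)) with the three-way elif on (i+1)
def aLoop (scores : List Int) : Int × Int × Int :=
  (PySem.List.pyRange 0 (scores.length : Int) 1).foldl
    (fun (acc : Int × Int × Int) i =>
      if (i + 1) ∈ ([1, 6, 8, 11, 12, 14, 18] : List Int) then
        (acc.1 + PySem.List.pyGetD scores i 0, acc.2.1, acc.2.2)
      else if (i + 1) ∈ ([2, 4, 7, 9, 15, 19, 20] : List Int) then
        (acc.1, acc.2.1 + PySem.List.pyGetD scores i 0, acc.2.2)
      else if (i + 1) ∈ ([3, 5, 10, 13, 16, 17, 21] : List Int) then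
        (acc.1, acc.2.1, acc.2.2 + PySem.List.pyGetD scores i 0)
      else acc)
    (0, 0, 0)

-- A's for-loop over emotions, adding/subtracting 1 from total_score
def aTotal (total0 : Int) (emotions : List String) (negatives : List String) : Int :=
  emotions.foldl (fun t emo => if emo ∈ negatives then t + 1 else t - 1) total0

def assessment (emotions : List String) (scores : List Int) (negatives : List String) : String × String × List Int × Int :=
  let st := aLoop scores
  let dass_val : List Int := [st.1, st.2.1, st.2.2]
  let total0 : Int := st.1 + st.2.1 + st.2.2
  let total := aTotal total0 emotions negatives
  let fa := finalAssessmentA total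
  (fa.1, fa.2, dass_val, total)

-- ===== PORT B =====
def severityB (score : Int) : String × String :=
  if score ≤ 20 then ("Normal", "Focus on self care")
  else if score ≤ 32 then ("Mild", "Advise to consult a psychologist")
  else if score ≤ 41 then ("Moderate", "Best to consult a psychologist")
  else if score ≤ 47 then ("Severe", "Advise to consult a psychiatrist")
  else ("Extreme", "Must see a psychiatrist")

-- B's subscore: sum(scores[i-1] for i in idx if i-1 < len(scores))
def bSubscore (scores : List Int) (idx : List Int) : Int :=
  idx.foldl (fun acc i =>
    if i - 1 < (scores.length : Int) then acc + PySem.List.pyGetD scores (i - 1) 0 else acc) 0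

-- B's negative_hits: sum(1 for e in emotions if e in negatives)
def bHits (emotions : List String) (negatives : List String) : Int :=
  emotions.foldl (fun c e => if e ∈ negatives then c + 1 else c) 0

def assessment_alt (emotions : List String) (scores : List Int) (negatives : List String) : String × String × List Int × Int :=
  let dass_val : List Int :=
    [bSubscore scores [1, 6, 8, 11, 12, 14, 18],
     bSubscore scores [2, 4, 7, 9, 15, 19, 20],
     bSubscore scores [3, 5, 10, 13, 16, 17, 21]]
  let total : Int := dass_val.sum + 2 * bHits emotions negatives - emotions.length
  let fa := severityB total
  (fa.1, fa.2, dass_val, total)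

-- ===== PRECONDITION & SPEC =====
def Spec_assessment (emotions : List String) (scores : List Int) (negatives : List String) (out : String × String × List Int × Int) : Prop := out = assessment_alt emotions scores negatives
instance (emotions : List String) (scores : List Int) (negatives : List String) (out : String × String × List Int × Int) : Decidable (Spec_assessment emotions scores negatives out) := by unfold Spec_assessment; infer_instance

-- ===== CLAIM (what is proved, stated in full; the proofs are below) =====
def Claim_equal_assessment : Prop := ∀ (emotions : List String) (scores : List Int) (negatives : List String), Dom_assessment emotions scores negatives → Spec_assessment emotions scores negatives (assessment emotions scores negatives)

-- ===== LEMMAS AND PROOFS =====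

-- bSubscore with an arbitrary accumulator (for the induction)
def bS (scores : List Int) (idx : List Int) (init : Int) : Int :=
  idx.foldl (fun acc i =>
    if i - 1 < (scores.length : Int) then acc + PySem.List.pyGetD scores (i - 1) 0 else acc) init

theorem bSubscore_eq_bS (scores idx : List Int) : bSubscore scores idx = bS scores idx 0 := rfl

theorem bS_init (scores idx : List Int) (init : Int) :
    bS scores idx init = init + bS scores idx 0 := by
  induction idx generalizing init with
  | nil => simp [bS]
  | cons i t ih =>
    simp only [bS, List.foldl_cons] at *
    by_cases h : i - 1 < (scores.length : Int)
    · simp only [h, if_true]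
      rw [ih, ih (0 + _)]; omega
    · simp only [h, if_false]
      rw [ih]

theorem bS_append (ys : List Int) (y : Int) (idx : List Int)
    (hpos : ∀ i ∈ idx, 1 ≤ i) (hnd : idx.Nodup) :
    bS (ys ++ [y]) idx 0 =
      bS ys idx 0 + (if ((ys.length : Int) + 1) ∈ idx then y else 0) := by
  induction idx with
  | nil => simp [bS]
  | cons i t ih =>
    have hit : i ∉ t := (List.nodup_cons.mp hnd).1
    have hnt : t.Nodup := (List.nodup_cons.mp hnd).2
    have hpi : 1 ≤ i := hpos i List.mem_cons_self
    have hpt : ∀ j ∈ t, 1 ≤ j := fun j hj => hpos j (List.mem_cons_of_mem _ hj)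
    have hlen : (((ys ++ [y]).length : Int)) = (ys.length : Int) + 1 := by simp
    by_cases hi : i = (ys.length : Int) + 1
    · have hg1 : i - 1 < ((ys ++ [y]).length : Int) := by omega
      have hg2 : ¬ (i - 1 < (ys.length : Int)) := by omega
      have hget : PySem.List.pyGetD (ys ++ [y]) (i - 1) 0 = y := by
        rw [PySem.List.pyGetD_eq_getElem _ _ (by omega) hg1]
        have h3 : (i - 1).toNat = ys.length := by omega
        simp [h3]
      have hmem : ((ys.length : Int) + 1) ∉ t := by rw [← hi]; exact hit
      simp only [bS, List.foldl_cons, hg1, if_true, hg2, if_false]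
      rw [hget]
      rw [show (List.foldl _ (0 + y) t : Int) = bS (ys ++ [y]) t (0 + y) from rfl,
          show (List.foldl _ (0:Int) t : Int) = bS ys t 0 from rfl,
          bS_init, ih hpt hnt]
      simp [hmem, hi]
      omega
    · have hmem : ((((ys.length : Int) + 1) ∈ (i :: t)) ↔ (((ys.length : Int) + 1) ∈ t)) := by
        simp only [List.mem_cons]
        exact ⟨fun h => h.elim (fun h => absurd h.symm hi) id, Or.inr⟩
      by_cases hg : i - 1 < (ys.length : Int)
      · have hg1 : i - 1 < ((ys ++ [y]).length : Int) := by omega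
        have hget : PySem.List.pyGetD (ys ++ [y]) (i - 1) 0 = PySem.List.pyGetD ys (i - 1) 0 := by
          rw [PySem.List.pyGetD_eq_getElem _ _ (by omega) hg1,
              PySem.List.pyGetD_eq_getElem _ _ (by omega) hg]
          have hlt : (i - 1).toNat < ys.length := by omega
          rw [List.getElem_append_left hlt]
        simp only [bS, List.foldl_cons, hg1, if_true, hg]
        rw [hget]
        rw [show (List.foldl _ (0 + PySem.List.pyGetD ys (i-1) 0) t : Int) = bS (ys ++ [y]) t (0 + PySem.List.pyGetD ys (i-1) 0) from rfl,
            show (List.foldl _ (0 + PySem.List.pyGetD ys (i-1) 0) t : Int) = bS ys t (0 + PySem.List.pyGetD ys (i-1) 0) from rfl,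
            bS_init, bS_init ys, ih hpt hnt]
        simp only [hmem]
        by_cases hm : ((ys.length : Int) + 1) ∈ t <;> (simp [hm]; try omega)
      · have hg1 : ¬ (i - 1 < ((ys ++ [y]).length : Int)) := by
          intro hc; exact hi (by omega)
        simp only [bS, List.foldl_cons, hg1, if_false, hg]
        rw [show (List.foldl _ (0:Int) t : Int) = bS (ys ++ [y]) t 0 from rfl,
            show (List.foldl _ (0:Int) t : Int) = bS ys t 0 from rfl,
            ih hpt hnt]
        simp only [hmem]

theorem disjSA (x : Int) (h : x ∈ ([1, 6, 8, 11, 12, 14, 18] : List Int)) :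
    x ∉ ([2, 4, 7, 9, 15, 19, 20] : List Int) := by
  simp only [List.mem_cons, List.not_mem_nil, or_false] at *; omega

theorem disjSD (x : Int) (h : x ∈ ([1, 6, 8, 11, 12, 14, 18] : List Int)) :
    x ∉ ([3, 5, 10, 13, 16, 17, 21] : List Int) := by
  simp only [List.mem_cons, List.not_mem_nil, or_false] at *; omega

theorem disjAD (x : Int) (h : x ∈ ([2, 4, 7, 9, 15, 19, 20] : List Int)) :
    x ∉ ([3, 5, 10, 13, 16, 17, 21] : List Int) := by
  simp only [List.mem_cons, List.not_mem_nil, or_false] at *; omega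

theorem aLoop_eq (scores : List Int) :
    aLoop scores =
      (bSubscore scores [1, 6, 8, 11, 12, 14, 18],
       bSubscore scores [2, 4, 7, 9, 15, 19, 20],
       bSubscore scores [3, 5, 10, 13, 16, 17, 21]) := by
  induction scores using List.reverseRecOn with
  | nil => decide
  | append_singleton ys y ih =>
    have hlen : (((ys ++ [y]).length : Int)) = (ys.length : Int) + 1 := by simp
    have hsplit : PySem.List.pyRange 0 ((ys ++ [y]).length : Int) 1 =
        PySem.List.pyRange 0 (ys.length : Int) 1 ++ [(ys.length : Int)] := by
      rw [hlen, PySem.List.pyRange_one_succ_right (by positivity)]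
    unfold aLoop
    rw [hsplit, List.foldl_append]
    have hcongr := PySem.List.foldl_congr_mem
      (l := PySem.List.pyRange 0 ((ys.length : Int)) 1)
      (init := (((0:Int)),((0:Int)),((0:Int))))
      (f := fun (acc : Int × Int × Int) i =>
        if (i + 1) ∈ ([1, 6, 8, 11, 12, 14, 18] : List Int) then
          (acc.1 + PySem.List.pyGetD (ys ++ [y]) i 0, acc.2.1, acc.2.2)
        else if (i + 1) ∈ ([2, 4, 7, 9, 15, 19, 20] : List Int) then
          (acc.1, acc.2.1 + PySem.List.pyGetD (ys ++ [y]) i 0, acc.2.2)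
        else if (i + 1) ∈ ([3, 5, 10, 13, 16, 17, 21] : List Int) then
          (acc.1, acc.2.1, acc.2.2 + PySem.List.pyGetD (ys ++ [y]) i 0)
        else acc)
      (g := fun (acc : Int × Int × Int) i =>
        if (i + 1) ∈ ([1, 6, 8, 11, 12, 14, 18] : List Int) then
          (acc.1 + PySem.List.pyGetD ys i 0, acc.2.1, acc.2.2)
        else if (i + 1) ∈ ([2, 4, 7, 9, 15, 19, 20] : List Int) then
          (acc.1, acc.2.1 + PySem.List.pyGetD ys i 0, acc.2.2)
        else if (i + 1) ∈ ([3, 5, 10, 13, 16, 17, 21] : List Int) then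
          (acc.1, acc.2.1, acc.2.2 + PySem.List.pyGetD ys i 0)
        else acc)
      (by
        intro acc i hi
        have hmem := (PySem.List.mem_pyRange_one).mp hi
        have hget : PySem.List.pyGetD (ys ++ [y]) i 0 = PySem.List.pyGetD ys i 0 := by
          rw [PySem.List.pyGetD_eq_getElem _ _ hmem.1 (by omega),
              PySem.List.pyGetD_eq_getElem _ _ hmem.1 (by omega)]
          have hlt : i.toNat < ys.length := by omega
          rw [List.getElem_append_left hlt]
        simp only [hget])
    rw [hcongr]
    have ih' := ih
    unfold aLoop at ih'
    rw [ih']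
    simp only [List.foldl_cons, List.foldl_nil]
    have hgety : PySem.List.pyGetD (ys ++ [y]) ((ys.length : Int)) 0 = y := by
      rw [PySem.List.pyGetD_eq_getElem _ _ (by positivity) (by omega)]
      simp
    simp only [bSubscore_eq_bS,
      bS_append ys y [1, 6, 8, 11, 12, 14, 18] (by decide) (by decide),
      bS_append ys y [2, 4, 7, 9, 15, 19, 20] (by decide) (by decide),
      bS_append ys y [3, 5, 10, 13, 16, 17, 21] (by decide) (by decide), hgety]
    by_cases hS : ((ys.length : Int) + 1) ∈ ([1, 6, 8, 11, 12, 14, 18] : List Int)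
    · have hA := disjSA _ hS; have hD := disjSD _ hS
      simp [hS, hA, hD]
    · by_cases hA : ((ys.length : Int) + 1) ∈ ([2, 4, 7, 9, 15, 19, 20] : List Int)
      · have hD := disjAD _ hA
        simp [hS, hA, hD]
      · by_cases hD : ((ys.length : Int) + 1) ∈ ([3, 5, 10, 13, 16, 17, 21] : List Int)
        · simp [hS, hA, hD]
        · simp [hS, hA, hD]

-- bHits with an arbitrary accumulator
def bH (emotions : List String) (negatives : List String) (init : Int) : Int :=
  emotions.foldl (fun c e => if e ∈ negatives then c + 1 else c) init

theorem bH_init (emotions negatives : List String) (init : Int) :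
    bH emotions negatives init = init + bH emotions negatives 0 := by
  induction emotions generalizing init with
  | nil => simp [bH]
  | cons e t ih =>
    simp only [bH, List.foldl_cons] at *
    by_cases h : e ∈ negatives
    · simp only [h, if_true]; rw [ih, ih (0 + 1)]; omega
    · simp only [h, if_false]; rw [ih]

theorem aTotal_eq (emotions negatives : List String) (t0 : Int) :
    aTotal t0 emotions negatives = t0 + 2 * bHits emotions negatives - emotions.length := by
  induction emotions generalizing t0 with
  | nil => simp [aTotal, bHits]
  | cons e t ih =>
    have hlen : (((e :: t).length : Int)) = (t.length : Int) + 1 := by simp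
    simp only [aTotal, bHits, List.foldl_cons] at *
    by_cases h : e ∈ negatives
    · simp only [h, if_true]
      rw [ih, show (List.foldl _ ((0:Int)+1) t : Int) = bH t negatives (0+1) from rfl, bH_init, hlen]
      rw [show (List.foldl _ (0:Int) t : Int) = bH t negatives 0 from rfl]
      ring
    · simp only [h, if_false]
      rw [ih, hlen]; ring

-- ===== VERDICT (by name: the statement is the Claim_ definition above) =====
theorem assessment_spec : Claim_equal_assessment := by
  intro emotions scores negatives _
  unfold Spec_assessment assessment assessment_alt
  simp only [aLoop_eq, aTotal_eq, List.sum_cons, List.sum_nil]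
  have hfa : severityB = finalAssessmentA := rfl
  rw [hfa]
  have h : ∀ a b c : Int, a + (b + (c + 0)) = a + b + c := by intros; ring
  rw [h]
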